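-- pv_equiv track=rewrite | github.com/helipillo/calendarSync | CalendarBridge/Resources/hxstore_extract.py | normalize_candidate
-- ===== SOURCE A (Python) =====
-- def normalize_candidate(candidate: str, strings: list[str]) -> str:
--     timezone_like = [value for value in strings if "/" in value and " " not in value and len(value) < 40]
--     for timezone_prefix in sorted(set(timezone_like), key=len, reverse=True):
--         if candidate.startswith(timezone_prefix) and len(candidate) > len(timezone_prefix):
--             remainder = candidate[len(timezone_prefix) :].strip()
--             if remainder:
--                 candidate = remainder
--                 break
--     return candidate.strip(" ;,\n\t")
-- ===== SOURCE B (Python) =====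
-- def normalize_candidate(candidate: str, strings: list[str]) -> str:
--     best = None
--     for v in strings:
--         if ("/" in v and " " not in v and len(v) < 40
--                 and candidate.startswith(v) and len(candidate) > len(v)
--                 and candidate[len(v):].strip()):
--             if best is None or len(v) > len(best):
--                 best = v
--     if best is not None:
--         candidate = candidate[len(best):].strip()
--     return candidate.strip(" ;,\n\t")
-- ===== Notes on version B (the rewrite author's own statement) =====
-- stated objective: alternative
-- what changed: B replaces A's filter-deduplicate-sort-by-length-then-scan-with-break pipeline by a single forward pass over strings that keeps the longest qualifying prefix in an accumulator (equal-length qualifying prefixes of candidate coincide, so the length-maximum is unique) and strips once at the end.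
import Mathlib
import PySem

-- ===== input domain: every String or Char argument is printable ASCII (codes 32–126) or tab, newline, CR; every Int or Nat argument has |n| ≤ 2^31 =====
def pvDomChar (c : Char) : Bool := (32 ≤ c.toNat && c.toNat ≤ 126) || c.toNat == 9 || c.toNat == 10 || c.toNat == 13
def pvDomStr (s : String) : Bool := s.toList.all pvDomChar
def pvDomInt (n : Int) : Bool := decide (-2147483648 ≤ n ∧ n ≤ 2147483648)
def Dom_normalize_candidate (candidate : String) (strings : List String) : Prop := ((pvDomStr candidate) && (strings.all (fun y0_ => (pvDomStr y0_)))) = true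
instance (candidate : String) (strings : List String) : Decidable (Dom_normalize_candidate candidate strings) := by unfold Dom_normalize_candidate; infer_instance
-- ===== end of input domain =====

-- B replaces A's filter/dedup/sort-by-length/scan-with-break pipeline by one forward pass over
-- strings keeping the longest qualifying prefix in an accumulator; same return value everywhere
-- (equal-length qualifying prefixes of candidate coincide, so the length-maximum is unique).

-- ===== PORT A =====
-- the 'for timezone_prefix in sorted(...): ... break' loop of A
def pvLoopA (candidate : String) : List String → String
  | [] => candidate
  | p :: rest =>
    if PySem.Str.startswith candidate p && decide (PySem.Str.len p < PySem.Str.len candidate) then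
      if PySem.Str.strip (PySem.Str.slice candidate (some (PySem.Str.len p)) none) ≠ "" then
        PySem.Str.strip (PySem.Str.slice candidate (some (PySem.Str.len p)) none)
      else pvLoopA candidate rest
    else pvLoopA candidate rest

def normalize_candidate (candidate : String) (strings : List String) : String :=
  let timezone_like := strings.filter (fun v =>
    PySem.Str.isIn "/" v && !(PySem.Str.isIn " " v) && decide (PySem.Str.len v < 40))
  -- sorted(set(timezone_like), key=len, reverse=True): ties under len are never inspected by the
  -- loop (two same-length prefixes of candidate coincide), so CPython's set order is immaterial
  PySem.Str.stripChars
    (pvLoopA candidate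
      (PySem.List.sorted (PySem.Set.ofList timezone_like) (fun v => PySem.Str.len v) true))
    " ;,\n\t"

-- ===== PORT B =====
-- the big 'if' guarding B's accumulator update, one Bool
def pvQual (candidate v : String) : Bool :=
  PySem.Str.isIn "/" v && !(PySem.Str.isIn " " v) && decide (PySem.Str.len v < 40) &&
  PySem.Str.startswith candidate v && decide (PySem.Str.len v < PySem.Str.len candidate) &&
  decide (PySem.Str.strip (PySem.Str.slice candidate (some (PySem.Str.len v)) none) ≠ "")

-- one iteration of B's 'for v in strings' accumulator loop
def pvBestStep (candidate : String) (best : Option String) (v : String) : Option String :=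
  if pvQual candidate v then
    match best with
    | none => some v
    | some b => if PySem.Str.len b < PySem.Str.len v then some v else best
  else best

def normalize_candidate_alt (candidate : String) (strings : List String) : String :=
  let best := strings.foldl (pvBestStep candidate) none
  let candidate' := match best with
    | some b => PySem.Str.strip (PySem.Str.slice candidate (some (PySem.Str.len b)) none)
    | none => candidate
  PySem.Str.stripChars candidate' " ;,\n\t"

-- ===== PRECONDITION & SPEC =====
def Spec_normalize_candidate (candidate : String) (strings : List String) (out : String) : Prop := out = normalize_candidate_alt candidate strings
instance (candidate : String) (strings : List String) (out : String) : Decidable (Spec_normalize_candidate candidate strings out) := by unfold Spec_normalize_candidate; infer_instance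

-- ===== CLAIM (what is proved, stated in full; the proofs are below) =====
def Claim_equal_normalize_candidate : Prop := ∀ (candidate : String) (strings : List String), Dom_normalize_candidate candidate strings → Spec_normalize_candidate candidate strings (normalize_candidate candidate strings)

-- ===== LEMMAS AND PROOFS =====

-- the break-on-first-hit condition of A's loop, as one predicate
def pvPredA (candidate p : String) : Bool :=
  (PySem.Str.startswith candidate p && decide (PySem.Str.len p < PySem.Str.len candidate)) &&
  decide (PySem.Str.strip (PySem.Str.slice candidate (some (PySem.Str.len p)) none) ≠ "")

lemma pvQual_iff (candidate v : String) :
    pvQual candidate v = true ↔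
      ((PySem.Str.isIn "/" v && !(PySem.Str.isIn " " v) && decide (PySem.Str.len v < 40)) = true
        ∧ pvPredA candidate v = true) := by
  unfold pvQual pvPredA
  simp only [Bool.and_eq_true]
  constructor
  · rintro ⟨⟨⟨⟨⟨h1, h2⟩, h3⟩, h4⟩, h5⟩, h6⟩
    exact ⟨⟨⟨h1, h2⟩, h3⟩, ⟨h4, h5⟩, h6⟩
  · rintro ⟨⟨⟨h1, h2⟩, h3⟩, ⟨h4, h5⟩, h6⟩
    exact ⟨⟨⟨⟨⟨h1, h2⟩, h3⟩, h4⟩, h5⟩, h6⟩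

lemma pvLoopA_eq_find (candidate : String) (ps : List String) :
    pvLoopA candidate ps = (match ps.find? (pvPredA candidate) with
      | some p => PySem.Str.strip (PySem.Str.slice candidate (some (PySem.Str.len p)) none)
      | none => candidate) := by
  induction ps with
  | nil => rfl
  | cons p rest ih =>
    by_cases hs : PySem.Chars.startswith candidate.toList p.toList = true
    · by_cases hl : p.length < candidate.length
      · by_cases h2 : PySem.Str.strip (PySem.Str.slice candidate (some (p.length : Int)) none) = ""
        · simp [pvLoopA, pvPredA, hs, hl, h2, ih]
        · simp [pvLoopA, pvPredA, hs, hl, h2]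
      · simp [pvLoopA, pvPredA, hs, hl, ih]
    · simp [pvLoopA, pvPredA, hs, ih]

lemma pvSlice_toList (candidate : String) (cut : Int) (h0 : 0 ≤ cut) :
    (PySem.Str.slice candidate none (some cut)).toList = candidate.toList.take cut.toNat := by
  rw [PySem.Str.toList_slice]
  simp [PySem.Chars.slice_eq_listSlice, PySem.List.slice_to _ h0]

-- a string that startswith-matches candidate IS the slice of its own length
lemma pvPrefix_eq_slice (candidate p : String)
    (hpre : PySem.Str.startswith candidate p = true) :
    PySem.Str.slice candidate none (some (PySem.Str.len p)) = p := by
  rw [PySem.Str.startswith_eq, PySem.Chars.startswith_iff] at hpre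
  rw [← String.toList_inj]
  rw [pvSlice_toList _ _ (by rw [PySem.Str.len_eq]; exact_mod_cast Nat.zero_le _),
    PySem.Str.len_eq]
  simpa using (List.prefix_iff_eq_take.mp hpre).symm

-- one accumulator update of B, characterised: on a qualifying v the result is some w with
-- w the longer of v and the old best
lemma pvStep_char (c v : String) (acc : Option String) (hq : pvQual c v = true) :
    ∃ w, pvBestStep c acc v = some w ∧ (acc = some w ∨ w = v) ∧
      PySem.Str.len v ≤ PySem.Str.len w ∧
      ∀ a, acc = some a → PySem.Str.len a ≤ PySem.Str.len w := by
  cases acc with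
  | none =>
    exact ⟨v, by unfold pvBestStep; rw [if_pos hq], Or.inr rfl, le_rfl,
      by intro a ha; cases ha⟩
  | some a0 =>
    have hred : pvBestStep c (some a0) v =
        if PySem.Str.len a0 < PySem.Str.len v then some v else some a0 := by
      unfold pvBestStep; rw [if_pos hq]
    by_cases hlt : PySem.Str.len a0 < PySem.Str.len v
    · exact ⟨v, by rw [hred, if_pos hlt], Or.inr rfl, le_rfl,
        fun a ha => by cases ha; exact le_of_lt hlt⟩
    · exact ⟨a0, by rw [hred, if_neg hlt], Or.inl rfl, not_lt.mp hlt,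
        fun a ha => by cases ha; exact le_rfl⟩

lemma pvStep_skip (c v : String) (acc : Option String) (hq : pvQual c v = false) :
    pvBestStep c acc v = acc := by
  simp [pvBestStep, hq]

-- if B's fold ends with no best, nothing qualified (and it started with none)
lemma pvFold_none (c : String) : ∀ (l : List String) (acc : Option String),
    l.foldl (pvBestStep c) acc = none → acc = none ∧ ∀ v ∈ l, pvQual c v = false := by
  intro l
  induction l with
  | nil => intro acc h; exact ⟨h, by simp⟩
  | cons v rest ih =>
    intro acc h
    rw [List.foldl_cons] at h
    by_cases hq : pvQual c v = true
    · exfalso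
      obtain ⟨w, hw, -⟩ := pvStep_char c v acc hq
      rw [hw] at h
      exact absurd (ih _ h).1 (by simp)
    · rw [Bool.not_eq_true] at hq
      rw [pvStep_skip c v acc hq] at h
      obtain ⟨hacc, hrest⟩ := ih _ h
      refine ⟨hacc, ?_⟩
      intro w hw
      rcases List.mem_cons.mp hw with h1 | h1
      · exact h1 ▸ hq
      · exact hrest w h1

-- if B's fold ends with best = some b, b is a qualifying element and is length-maximal
lemma pvFold_some (c : String) : ∀ (l : List String) (acc : Option String) (b : String),
    l.foldl (pvBestStep c) acc = some b →
    (acc = some b ∨ (b ∈ l ∧ pvQual c b = true)) ∧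
    (∀ v ∈ l, pvQual c v = true → PySem.Str.len v ≤ PySem.Str.len b) ∧
    (∀ a, acc = some a → PySem.Str.len a ≤ PySem.Str.len b) := by
  intro l
  induction l with
  | nil =>
    intro acc b h
    refine ⟨Or.inl h, by simp, ?_⟩
    intro a ha
    rw [ha] at h
    cases h
    exact le_rfl
  | cons v rest ih =>
    intro acc b h
    rw [List.foldl_cons] at h
    by_cases hq : pvQual c v = true
    · obtain ⟨w, hw, hwor, hvw, hwacc⟩ := pvStep_char c v acc hq
      rw [hw] at h
      obtain ⟨ih1, ih2, ih3⟩ := ih _ _ h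
      have hwb : PySem.Str.len w ≤ PySem.Str.len b := ih3 w rfl
      refine ⟨?_, ?_, ?_⟩
      · rcases ih1 with h1 | h1
        · cases h1
          rcases hwor with h2 | h2
          · exact Or.inl h2
          · exact Or.inr ⟨h2 ▸ List.mem_cons_self, h2 ▸ hq⟩
        · exact Or.inr ⟨List.mem_cons_of_mem v h1.1, h1.2⟩
      · intro u hu huq
        rcases List.mem_cons.mp hu with h1 | h1
        · exact h1 ▸ le_trans hvw hwb
        · exact ih2 u h1 huq
      · intro a ha
        exact le_trans (hwacc a ha) hwb
    · rw [Bool.not_eq_true] at hq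
      rw [pvStep_skip c v acc hq] at h
      obtain ⟨ih1, ih2, ih3⟩ := ih _ _ h
      refine ⟨?_, ?_, ih3⟩
      · rcases ih1 with h1 | h1
        · exact Or.inl h1
        · exact Or.inr ⟨List.mem_cons_of_mem v h1.1, h1.2⟩
      · intro u hu huq
        rcases List.mem_cons.mp hu with h1 | h1
        · rw [h1, hq] at huq; cases huq
        · exact ih2 u h1 huq

-- core: A's sorted-scan-with-break equals B's longest-qualifying selection
lemma pvCore (candidate : String) (strings : List String) :
    pvLoopA candidate
        (PySem.List.sorted (PySem.Set.ofList (strings.filter (fun v =>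
          PySem.Str.isIn "/" v && !(PySem.Str.isIn " " v) && decide (PySem.Str.len v < 40))))
          (fun v => PySem.Str.len v) true)
      = (match strings.foldl (pvBestStep candidate) none with
          | some b => PySem.Str.strip (PySem.Str.slice candidate (some (PySem.Str.len b)) none)
          | none => candidate) := by
  set f : String → Bool := fun v =>
    PySem.Str.isIn "/" v && !(PySem.Str.isIn " " v) && decide (PySem.Str.len v < 40) with hf
  set tzl := strings.filter f with htzl
  set sortedL := PySem.List.sorted (PySem.Set.ofList tzl) (fun v => PySem.Str.len v) true
    with hsorted
  have hmemS : ∀ q, q ∈ sortedL ↔ (q ∈ strings ∧ f q = true) := by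
    intro q
    rw [hsorted, PySem.List.mem_sorted, PySem.Set.mem_ofList, htzl, List.mem_filter]
  rw [pvLoopA_eq_find]
  cases hB : strings.foldl (pvBestStep candidate) none with
  | none =>
    obtain ⟨_, hnone⟩ := pvFold_none candidate strings none hB
    have : sortedL.find? (pvPredA candidate) = none := by
      rw [List.find?_eq_none]
      intro q hq hA
      obtain ⟨hqs, hqf⟩ := (hmemS q).mp hq
      have : pvQual candidate q = true := (pvQual_iff candidate q).mpr ⟨hqf, hA⟩
      rw [hnone q hqs] at this
      cases this
    rw [this]
  | some b =>
    obtain ⟨hb1, hbmax, _⟩ := pvFold_some candidate strings none b hB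
    have hbq : b ∈ strings ∧ pvQual candidate b = true := by
      rcases hb1 with h | h
      · cases h
      · exact h
    obtain ⟨hbf, hbA⟩ := (pvQual_iff candidate b).mp hbq.2
    have hbmem : b ∈ sortedL := (hmemS b).mpr ⟨hbq.1, hbf⟩
    -- find? cannot be none since b is in the sorted list and satisfies pvPredA
    cases hfind : sortedL.find? (pvPredA candidate) with
    | none =>
      exact absurd hbA (by simpa using List.find?_eq_none.mp hfind b hbmem)
    | some p =>
      obtain ⟨hpA, as, bs, hdecomp, hbefore⟩ := List.find?_eq_some_iff_append.mp hfind
      have hpmem : p ∈ sortedL := List.mem_of_find?_eq_some hfind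
      obtain ⟨hps, hpf⟩ := (hmemS p).mp hpmem
      have hpq : pvQual candidate p = true := (pvQual_iff candidate p).mpr ⟨hpf, hpA⟩
      -- len p ≤ len b by B's maximality
      have hple : PySem.Str.len p ≤ PySem.Str.len b := hbmax p hps hpq
      -- len b ≤ len p by A's sorted-first-hit maximality
      have hpair := PySem.List.sorted_pairwise_rev (PySem.Set.ofList tzl)
        (fun v => PySem.Str.len v)
      rw [← hsorted, hdecomp] at hpair
      have hbs : ∀ x ∈ bs, PySem.Str.len x ≤ PySem.Str.len p :=
        (List.pairwise_cons.mp (List.pairwise_append.mp hpair).2.1).1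
      have hble : PySem.Str.len b ≤ PySem.Str.len p := by
        have : b ∈ as ++ p :: bs := hdecomp ▸ hbmem
        rcases List.mem_append.mp this with hin | hin
        · exact absurd hbA (by simpa using hbefore b hin)
        · rcases List.mem_cons.mp hin with heq | hin
          · rw [heq]
          · exact hbs b hin
      -- equal lengths and both prefixes of candidate ⇒ p = b
      have hsA : PySem.Str.startswith candidate p = true := by
        rw [pvPredA, Bool.and_eq_true, Bool.and_eq_true] at hpA; exact hpA.1.1
      have hsB : PySem.Str.startswith candidate b = true := by
        rw [pvPredA, Bool.and_eq_true, Bool.and_eq_true] at hbA; exact hbA.1.1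
      have hpb : p = b := by
        rw [← pvPrefix_eq_slice candidate p hsA, ← pvPrefix_eq_slice candidate b hsB,
          le_antisymm hple hble]
      rw [hpb]

lemma pvMain (candidate : String) (strings : List String) :
    normalize_candidate candidate strings = normalize_candidate_alt candidate strings := by
  show PySem.Str.stripChars _ _ = PySem.Str.stripChars _ _
  exact congrArg (fun s => PySem.Str.stripChars s " ;,\n\t") (pvCore candidate strings)

-- ===== VERDICT (by name: the statement is the Claim_ definition above) =====
theorem normalize_candidate_spec : Claim_equal_normalize_candidate := by
  intro candidate strings _
  unfold Spec_normalize_candidate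
  exact pvMain candidate strings
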